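-- pv_equiv track=rewrite | github.com/dimistsaousis/coursera | Algorithms & Data Structures Specialisation/Algorithmic Toolbox/w6_dynamic_programming_part_2/2_partition3.py | partition3d
-- ===== SOURCE A (Python) =====
-- def partition3d(souvenirs):
--     total = sum(souvenirs)
--     souvenirs_len = len(souvenirs)
--
--     if total % 3 != 0:
--         return 0
--
--     total = total//3
--     v = init_matrix3d(total, total, souvenirs_len)
--
--     for tot_1 in range(total+1):
--         for tot_2 in range(total+1):
--             for ai in range(souvenirs_len+1):
--                 if tot_1 == tot_2 == 0:
--                     v[tot_1][tot_2][ai] = 1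
--                 elif ai == 0 and (tot_1 != 0 or tot_2 != 0):
--                     v[tot_1][tot_2][ai] = 0
--                 else:
--                     a = souvenirs[ai - 1]
--                     if tot_1 >= a:
--                         d11 = v[tot_1-a][tot_2][ai-1]
--                         d12 = v[tot_1][tot_2][ai - 1]
--                         d1 = max(d11, d12)
--                     else:
--                         d1 = v[tot_1][tot_2][ai-1]
--                     if tot_2 >= a:
--                         d21 = v[tot_1][tot_2-a][ai-1]
--                         d22 = v[tot_1][tot_2][ai-1]
--                         d2 = max(d21, d22)
--                     else:
--                         d2 = v[tot_1][tot_2][ai-1]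
--                     v[tot_1][tot_2][ai] = max(d1, d2)
--
--     return v[total][total][souvenirs_len]
--
-- def init_matrix(n1, n2):
--     matrix = []
--     for i in range(n1 + 1):
--         row = []
--         for j in range(n2 + 1):
--             row.append(0)
--         matrix.append(row)
--     return matrix
--
-- def init_matrix3d(n1, n2, n3):
--     matrix = []
--     for i in range(n1+1):
--         row = init_matrix(n2, n3)
--         matrix.append(row)
--     return matrix
-- ===== SOURCE B (Python) =====
-- def partition3d(souvenirs):
--     total = sum(souvenirs)
--     if total % 3 != 0:
--         return 0
--     t = total // 3
--     reachable = {(0, 0)}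
--     for a in souvenirs:
--         nxt = set()
--         for (s1, s2) in reachable:
--             nxt.add((s1, s2))
--             if s1 + a <= t:
--                 nxt.add((s1 + a, s2))
--             if s2 + a <= t:
--                 nxt.add((s1, s2 + a))
--         reachable = nxt
--     return 1 if (t, t) in reachable else 0
-- ===== Notes on version B (the rewrite author's own statement) =====
-- stated objective: simpler
-- what changed: Replaced the bottom-up 3D table (filled for every (t1,t2,ai) triple) by a forward reachable-set sweep: one pass over the items maintaining the set of achievable (bin1,bin2) sum pairs bounded by total/3, then a single membership test for (T,T).
import Mathlib
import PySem

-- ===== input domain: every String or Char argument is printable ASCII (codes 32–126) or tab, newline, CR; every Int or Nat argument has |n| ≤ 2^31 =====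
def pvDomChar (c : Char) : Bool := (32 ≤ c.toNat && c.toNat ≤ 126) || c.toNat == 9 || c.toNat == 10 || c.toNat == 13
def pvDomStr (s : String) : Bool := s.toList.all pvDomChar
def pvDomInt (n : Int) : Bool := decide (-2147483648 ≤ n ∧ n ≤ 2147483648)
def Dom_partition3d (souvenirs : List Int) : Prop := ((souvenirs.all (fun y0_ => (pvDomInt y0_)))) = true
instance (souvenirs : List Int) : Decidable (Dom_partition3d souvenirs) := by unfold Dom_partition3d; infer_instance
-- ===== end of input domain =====

-- B replaces A's bottom-up 3D DP table by a one-pass reachable-set sweep over (bin1,bin2) sum pairs (simpler).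

-- ===== PORT A =====
-- The Python 3D list-of-lists matrix is represented as an update list: mutation v[t1][t2][ai] = val
-- prepends a binding (pvUpd3), lookup pvGet3 takes the latest binding, default 0 = the all-zero
-- init_matrix3d. Inputs on which the Python indexes out of range (IndexError) are excluded by
-- Pre_partition3d below.
def pvUpd3 (v : List ((Int × Int × Int) × Int)) (x y z val : Int) : List ((Int × Int × Int) × Int) :=
  ((x, y, z), val) :: v

def pvGet3 (v : List ((Int × Int × Int) × Int)) (x y z : Int) : Int :=
  match v.find? (fun e => e.1 == (x, y, z)) with
  | some e => e.2
  | none => 0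

-- the body of A's innermost loop: the value written into v[t1][t2][ai]
def pvCellA (l : List Int) (v : List ((Int × Int × Int) × Int)) (t1 t2 ai : Int) : Int :=
  if t1 = 0 ∧ t2 = 0 then 1
  else if ai = 0 ∧ (t1 ≠ 0 ∨ t2 ≠ 0) then 0
  else
    let a := PySem.List.pyGetD l (ai - 1) 0
    let d1 := if t1 ≥ a then max (pvGet3 v (t1 - a) t2 (ai - 1)) (pvGet3 v t1 t2 (ai - 1))
              else pvGet3 v t1 t2 (ai - 1)
    let d2 := if t2 ≥ a then max (pvGet3 v t1 (t2 - a) (ai - 1)) (pvGet3 v t1 t2 (ai - 1))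
              else pvGet3 v t1 t2 (ai - 1)
    max d1 d2

def partition3d (souvenirs : List Int) : Int :=
  let total := souvenirs.sum
  let n : Int := souvenirs.length
  if PySem.Int.mod total 3 ≠ 0 then 0
  else
    let T := PySem.Int.floordiv total 3
    let v0 : List ((Int × Int × Int) × Int) := []      -- init_matrix3d(total, total, souvenirs_len): all zeros
    let v := (PySem.List.pyRange 0 (T + 1) 1).foldl (fun v t1 =>
      (PySem.List.pyRange 0 (T + 1) 1).foldl (fun v t2 =>
        (PySem.List.pyRange 0 (n + 1) 1).foldl (fun v ai =>
          pvUpd3 v t1 t2 ai (pvCellA souvenirs v t1 t2 ai)) v) v) v0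
    pvGet3 v T T n

-- ===== PORT B =====
-- one item step: from the set of achievable (bin1,bin2) pairs, add the item to bin1, bin2 or neither
def pvStep (t : Int) (cur : PySem.Set (Int × Int)) (a : Int) : PySem.Set (Int × Int) :=
  cur.foldl (fun nxt p =>
    let nxt := PySem.Set.add nxt p
    let nxt := if p.1 + a ≤ t then PySem.Set.add nxt (p.1 + a, p.2) else nxt
    if p.2 + a ≤ t then PySem.Set.add nxt (p.1, p.2 + a) else nxt) PySem.Set.empty

def partition3d_alt (souvenirs : List Int) : Int :=
  let total := souvenirs.sum
  if PySem.Int.mod total 3 ≠ 0 then 0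
  else
    let t := PySem.Int.floordiv total 3
    let reach := souvenirs.foldl (pvStep t) (PySem.Set.ofList [((0 : Int), (0 : Int))])
    if (t, t) ∈ reach then 1 else 0

-- ===== PRECONDITION & SPEC =====
-- Pre_ excludes exactly the inputs where A raises IndexError: sum a nonzero multiple of 3
-- together with a negative element (negative total ⇒ empty matrix; positive total ⇒ index t1-a > total).
def Pre_partition3d (souvenirs : List Int) : Prop :=
  PySem.Int.mod souvenirs.sum 3 ≠ 0 ∨ souvenirs.sum = 0 ∨ ∀ a ∈ souvenirs, 0 ≤ a
instance (souvenirs : List Int) : Decidable (Pre_partition3d souvenirs) := by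
  unfold Pre_partition3d; infer_instance

def pvWitness_partition3d : List Int := [1, 1, 1]

def Spec_partition3d (souvenirs : List Int) (out : Int) : Prop := out = partition3d_alt souvenirs
instance (souvenirs : List Int) (out : Int) : Decidable (Spec_partition3d souvenirs out) := by
  unfold Spec_partition3d; infer_instance

-- ===== CLAIM (what is proved, stated in full; the proofs are below) =====
def Claim_equal_partition3d : Prop := ∀ (souvenirs : List Int), Dom_partition3d souvenirs →
  Pre_partition3d souvenirs → Spec_partition3d souvenirs (partition3d souvenirs)

-- ===== LEMMAS AND PROOFS =====

-- the pure recurrence behind A's table: pvR l k t1 t2 = v[t1][t2][k]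
def pvR (l : List Int) : Nat → Int → Int → Int
  | 0, t1, t2 => if t1 = 0 ∧ t2 = 0 then (1 : Int) else 0
  | k + 1, t1, t2 =>
      if t1 = 0 ∧ t2 = 0 then (1 : Int)
      else
        let a := l.getD k 0
        let p := pvR l k t1 t2
        let d1 := if t1 ≥ a then max (pvR l k (t1 - a) t2) p else p
        let d2 := if t2 ≥ a then max (pvR l k t1 (t2 - a)) p else p
        max d1 d2

lemma pvR_zero_zero (l : List Int) (k : Nat) : pvR l k 0 0 = 1 := by
  cases k <;> simp [pvR]

lemma pvR_01 (l : List Int) (k : Nat) (x y : Int) : pvR l k x y = 0 ∨ pvR l k x y = 1 := by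
  induction k generalizing x y with
  | zero => by_cases h : x = 0 ∧ y = 0 <;> simp [pvR, h]
  | succ k ih =>
    by_cases h : x = 0 ∧ y = 0
    · simp [pvR, h]
    · simp only [pvR, if_neg h]
      set a := l.getD k 0 with hadef
      rcases ih x y with hp | hp <;>
      rcases ih (x - a) y with h1 | h1 <;>
      rcases ih x (y - a) with h2 | h2 <;>
      split_ifs <;> simp [hp, h1, h2]

lemma pvR_succ_eq_one_iff (l : List Int) (k : Nat) (x y : Int) :
    pvR l (k + 1) x y = 1 ↔
      (x = 0 ∧ y = 0) ∨ pvR l k x y = 1 ∨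
      (l.getD k 0 ≤ x ∧ pvR l k (x - l.getD k 0) y = 1) ∨
      (l.getD k 0 ≤ y ∧ pvR l k x (y - l.getD k 0) = 1) := by
  by_cases h : x = 0 ∧ y = 0
  · simp [pvR, h]
  · simp only [pvR, if_neg h]
    set a := l.getD k 0 with hadef
    rcases pvR_01 l k x y with hp | hp <;>
    rcases pvR_01 l k (x - a) y with h1 | h1 <;>
    rcases pvR_01 l k x (y - a) with h2 | h2 <;>
    split_ifs with hg1 hg2 <;>
    simp_all

-- ===== B side: membership in the reachable set =====

-- what one pvStep generates from a member p
def pvGen (t a : Int) (p q : Int × Int) : Prop :=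
  q = p ∨ (q = (p.1 + a, p.2) ∧ p.1 + a ≤ t) ∨ (q = (p.1, p.2 + a) ∧ p.2 + a ≤ t)

lemma mem_pvStep_aux (t a : Int) (s acc : List (Int × Int)) (q : Int × Int) :
    q ∈ s.foldl (fun nxt p =>
      let nxt := PySem.Set.add nxt p
      let nxt := if p.1 + a ≤ t then PySem.Set.add nxt (p.1 + a, p.2) else nxt
      if p.2 + a ≤ t then PySem.Set.add nxt (p.1, p.2 + a) else nxt) acc
    ↔ q ∈ acc ∨ ∃ p ∈ s, pvGen t a p q := by
  have hbody : ∀ (acc : List (Int × Int)) (p : Int × Int),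
      q ∈ (fun nxt p =>
        let nxt := PySem.Set.add nxt p
        let nxt := if p.1 + a ≤ t then PySem.Set.add nxt (p.1 + a, p.2) else nxt
        if p.2 + a ≤ t then PySem.Set.add nxt (p.1, p.2 + a) else nxt) acc p
      ↔ q ∈ acc ∨ pvGen t a p q := by
    intro acc p
    simp only [pvGen]
    split_ifs <;> simp only [PySem.Set.mem_add] <;> tauto
  induction s generalizing acc with
  | nil => simp
  | cons hd tl ih =>
    simp only [List.foldl_cons]
    simp only [ih, hbody]
    constructor
    · rintro ((hq | hg) | ⟨p, hp, hg⟩)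
      · exact Or.inl hq
      · exact Or.inr ⟨hd, by simp, hg⟩
      · exact Or.inr ⟨p, by simp [hp], hg⟩
    · rintro (hq | ⟨p, hp, hg⟩)
      · exact Or.inl (Or.inl hq)
      · rcases List.mem_cons.mp hp with rfl | hp
        · exact Or.inl (Or.inr hg)
        · exact Or.inr ⟨p, hp, hg⟩

lemma mem_pvStep (t a : Int) (s : PySem.Set (Int × Int)) (q : Int × Int) :
    q ∈ pvStep t s a ↔ ∃ p ∈ s, pvGen t a p q := by
  unfold pvStep
  rw [mem_pvStep_aux]
  simp [PySem.Set.empty]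

lemma mem_pvStep_self (t a : Int) (s : PySem.Set (Int × Int)) (q : Int × Int) (h : q ∈ s) :
    q ∈ pvStep t s a := (mem_pvStep t a s q).mpr ⟨q, h, Or.inl rfl⟩

-- the reachable set after the first k items
def pvS (l : List Int) (t : Int) (k : Nat) : PySem.Set (Int × Int) :=
  (l.take k).foldl (pvStep t) (PySem.Set.ofList [((0 : Int), (0 : Int))])

lemma pvS_zero (l : List Int) (t : Int) : pvS l t 0 = [((0 : Int), (0 : Int))] := by
  simp [pvS, PySem.Set.ofList]

lemma pvS_succ (l : List Int) (t : Int) (k : Nat) (hk : k < l.length) :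
    pvS l t (k + 1) = pvStep t (pvS l t k) (l.getD k 0) := by
  unfold pvS
  rw [List.take_add_one, List.foldl_append]
  simp [List.getElem?_eq_getElem hk, List.getD_eq_getElem?_getD]

lemma pvS_full (l : List Int) (t : Int) :
    l.foldl (pvStep t) (PySem.Set.ofList [((0 : Int), (0 : Int))]) = pvS l t l.length := by
  simp [pvS]

lemma pvS_zero_zero_mem (l : List Int) (t : Int) (k : Nat) : ((0 : Int), (0 : Int)) ∈ pvS l t k := by
  induction k with
  | zero => simp [pvS_zero]
  | succ k ih =>
    by_cases hk : k < l.length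
    · rw [pvS_succ l t k hk]; exact mem_pvStep_self _ _ _ _ ih
    · unfold pvS
      rw [show l.take (k + 1) = l.take k from by
        rw [List.take_of_length_le (by omega), List.take_of_length_le (by omega)]]
      exact ih

lemma pvS_bounds (l : List Int) (t : Int) (ht : 0 ≤ t) (h : ∀ a ∈ l, 0 ≤ a) (k : Nat)
    (p : Int × Int) (hp : p ∈ pvS l t k) : 0 ≤ p.1 ∧ p.1 ≤ t ∧ 0 ≤ p.2 ∧ p.2 ≤ t := by
  induction k generalizing p with
  | zero => rw [pvS_zero] at hp; simp at hp; simp [hp, ht]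
  | succ k ih =>
    by_cases hk : k < l.length
    · rw [pvS_succ l t k hk] at hp
      obtain ⟨q, hq, hg⟩ := (mem_pvStep _ _ _ _).mp hp
      obtain ⟨hb1, hb2, hb3, hb4⟩ := ih q hq
      have ha' : (0 : Int) ≤ l.getD k 0 := by
        rw [List.getD_eq_getElem l 0 hk]; exact h _ (List.getElem_mem hk)
      rcases hg with rfl | ⟨rfl, hle⟩ | ⟨rfl, hle⟩
      · exact ⟨hb1, hb2, hb3, hb4⟩
      · exact ⟨by show (0 : Int) ≤ q.1 + l.getD k 0; omega,
          by show q.1 + l.getD k 0 ≤ t; omega,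
          by show (0 : Int) ≤ q.2; omega,
          by show q.2 ≤ t; omega⟩
      · exact ⟨by show (0 : Int) ≤ q.1; omega,
          by show q.1 ≤ t; omega,
          by show (0 : Int) ≤ q.2 + l.getD k 0; omega,
          by show q.2 + l.getD k 0 ≤ t; omega⟩
    · unfold pvS at hp
      rw [List.take_of_length_le (by omega)] at hp
      have : pvS l t k = l.foldl (pvStep t) (PySem.Set.ofList [((0:Int),(0:Int))]) := by
        unfold pvS; rw [List.take_of_length_le (by omega)]
      exact ih p (by rw [this]; exact hp)

-- main correspondence: membership in pvS ↔ the DP recurrence value is 1 (bounded arguments)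
lemma pvS_iff_pvR (l : List Int) (t : Int) (ht : 0 ≤ t) (h : ∀ a ∈ l, 0 ≤ a)
    (k : Nat) (hk : k ≤ l.length) (x y : Int)
    (hx0 : 0 ≤ x) (hxt : x ≤ t) (hy0 : 0 ≤ y) (hyt : y ≤ t) :
    (x, y) ∈ pvS l t k ↔ pvR l k x y = 1 := by
  induction k generalizing x y with
  | zero =>
    rw [pvS_zero]
    by_cases hxy : x = 0 ∧ y = 0 <;> simp [pvR, hxy]
  | succ k ih =>
    have hk' : k < l.length := by omega
    have ha : 0 ≤ l.getD k 0 := h _ (by rw [List.getD_eq_getElem l 0 hk']; exact List.getElem_mem hk')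
    rw [pvS_succ l t k hk', pvR_succ_eq_one_iff, mem_pvStep]
    set a := l.getD k 0 with hadef
    constructor
    · rintro ⟨p, hp, hg⟩
      have hb := pvS_bounds l t ht h k p hp
      rcases hg with hq | ⟨hq, hle⟩ | ⟨hq, hle⟩
      · right; left
        rw [← ih (by omega) x y hx0 hxt hy0 hyt]
        rw [hq]; exact hp
      · right; right; left
        have h1 : p.1 = x - a := by have := congrArg Prod.fst hq; simp at this; omega
        have h2 : p.2 = y := by have := congrArg Prod.snd hq; simp at this; omega
        constructor
        · omega
        · rw [← ih (by omega) (x - a) y (by omega) (by omega) hy0 hyt]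
          have : p = (x - a, y) := by rw [Prod.ext_iff]; exact ⟨h1, h2⟩
          rw [← this]; exact hp
      · right; right; right
        have h1 : p.1 = x := by have := congrArg Prod.fst hq; simp at this; omega
        have h2 : p.2 = y - a := by have := congrArg Prod.snd hq; simp at this; omega
        constructor
        · omega
        · rw [← ih (by omega) x (y - a) hx0 hxt (by omega) (by omega)]
          have : p = (x, y - a) := by rw [Prod.ext_iff]; exact ⟨h1, h2⟩
          rw [← this]; exact hp
    · rintro (⟨rfl, rfl⟩ | hr | ⟨hle, hr⟩ | ⟨hle, hr⟩)
      · exact ⟨(0, 0), pvS_zero_zero_mem l t k, Or.inl rfl⟩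
      · exact ⟨(x, y), (ih (by omega) x y hx0 hxt hy0 hyt).mpr hr, Or.inl rfl⟩
      · refine ⟨(x - a, y), (ih (by omega) (x - a) y (by omega) (by omega) hy0 hyt).mpr hr, ?_⟩
        right; left; constructor
        · rw [Prod.ext_iff]; constructor <;> simp
        · simpa using hxt
      · refine ⟨(x, y - a), (ih (by omega) x (y - a) hx0 hxt (by omega) (by omega)).mpr hr, ?_⟩
        right; right; constructor
        · rw [Prod.ext_iff]; constructor <;> simp
        · simpa using hyt

-- ===== A side: the triple loop fills the table with pvR =====

lemma pvGet3_upd (v : List ((Int × Int × Int) × Int)) (x y z val a b c : Int) :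
    pvGet3 (pvUpd3 v x y z val) a b c = if a = x ∧ b = y ∧ c = z then val else pvGet3 v a b c := by
  by_cases h : a = x ∧ b = y ∧ c = z
  · obtain ⟨rfl, rfl, rfl⟩ := h
    simp [pvGet3, pvUpd3]
  · rw [if_neg h]
    unfold pvGet3 pvUpd3
    rw [List.find?_cons_of_neg (by simp; tauto)]

def pvAiLoop (l : List Int) (m : Int) (v : List ((Int × Int × Int) × Int)) (t1 t2 : Int) :
    List ((Int × Int × Int) × Int) :=
  (PySem.List.pyRange 0 m 1).foldl (fun v ai => pvUpd3 v t1 t2 ai (pvCellA l v t1 t2 ai)) v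

def pvT2Loop (l : List Int) (n m : Int) (v : List ((Int × Int × Int) × Int)) (t1 : Int) :
    List ((Int × Int × Int) × Int) :=
  (PySem.List.pyRange 0 m 1).foldl (fun v t2 => pvAiLoop l (n + 1) v t1 t2) v

def pvT1Loop (l : List Int) (n T m : Int) (v : List ((Int × Int × Int) × Int)) :
    List ((Int × Int × Int) × Int) :=
  (PySem.List.pyRange 0 m 1).foldl (fun v t1 => pvT2Loop l n (T + 1) v t1) v

lemma pvCellA_eq_pvR (l : List Int) (h : ∀ a ∈ l, 0 ≤ a) (v : List ((Int × Int × Int) × Int))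
    (t1 t2 : Int) (ht1 : 0 ≤ t1) (ht2 : 0 ≤ t2) (m : Nat) (hm : m ≤ l.length)
    (hprev : ∀ x y z, 0 ≤ x → 0 ≤ y → 0 ≤ z → z ≤ (l.length : Int) →
      ((x < t1 ∧ y ≤ max t1 t2) ∨ (x = t1 ∧ y < t2)) → pvGet3 v x y z = pvR l z.toNat x y)
    (hline : ∀ z : Nat, z < m → pvGet3 v t1 t2 z = pvR l z t1 t2) :
    pvCellA l v t1 t2 (m : Int) = pvR l m t1 t2 := by
  by_cases h00 : t1 = 0 ∧ t2 = 0
  · obtain ⟨rfl, rfl⟩ := h00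
    simp [pvCellA, pvR_zero_zero]
  · cases m with
    | zero =>
      rcases (by tauto : t1 ≠ 0 ∨ t2 ≠ 0) with hne | hne <;>
        simp [pvCellA, pvR, hne]
    | succ k =>
      have hklen : k < l.length := by omega
      have hacc : PySem.List.pyGetD l ((k + 1 : Nat) - 1) 0 = l.getD k 0 := by
        have : ((k + 1 : Nat) : Int) - 1 = (k : Int) := by push_cast; ring
        rw [this, PySem.List.pyGetD_natCast]
      have ha : 0 ≤ l.getD k 0 := h _ (by rw [List.getD_eq_getElem l 0 hklen]; exact List.getElem_mem hklen)
      have hzk : ((k : Int)).toNat = k := by omega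
      have hkcast : ((k + 1 : Nat) : Int) - 1 = (k : Int) := by push_cast; ring
      have hself : pvGet3 v t1 t2 ((k + 1 : Nat) - 1) = pvR l k t1 t2 := by
        rw [hkcast]; exact hline k (by omega)
      have hcross1 : l.getD k 0 ≤ t1 → pvGet3 v (t1 - l.getD k 0) t2 ((k + 1 : Nat) - 1) = pvR l k (t1 - l.getD k 0) t2 := by
        intro hle
        rw [hkcast]
        rcases eq_or_lt_of_le ha with heq | hpos
        · rw [← heq]; simpa using hline k (by omega)
        · rw [hprev (t1 - l.getD k 0) t2 k (by omega) ht2 (by omega) (by exact_mod_cast hklen.le) (Or.inl ⟨by omega, le_max_right _ _⟩), hzk]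
      have hcross2 : l.getD k 0 ≤ t2 → pvGet3 v t1 (t2 - l.getD k 0) ((k + 1 : Nat) - 1) = pvR l k t1 (t2 - l.getD k 0) := by
        intro hle
        rw [hkcast]
        rcases eq_or_lt_of_le ha with heq | hpos
        · rw [← heq]; simpa using hline k (by omega)
        · rw [hprev t1 (t2 - l.getD k 0) k ht1 (by omega) (by omega) (by exact_mod_cast hklen.le) (Or.inr ⟨rfl, by omega⟩), hzk]
      simp only [pvCellA, pvR, if_neg h00, hacc]
      have hne : ¬(((k + 1 : Nat) : Int) = 0 ∧ (t1 ≠ 0 ∨ t2 ≠ 0)) := by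
        push_cast; intro hc; omega
      rw [if_neg hne]
      by_cases hb1 : t1 ≥ l.getD k 0 <;> by_cases hb2 : t2 ≥ l.getD k 0 <;>
        simp only [if_pos, hb1, hb2, if_false] <;>
        rw [hself] <;>
        first
        | (rw [hcross1 hb1, hcross2 hb2])
        | (rw [hcross1 hb1])
        | (rw [hcross2 hb2])

lemma pvAiLoop_spec (l : List Int) (h : ∀ a ∈ l, 0 ≤ a) (v : List ((Int × Int × Int) × Int))
    (t1 t2 : Int) (ht1 : 0 ≤ t1) (ht2 : 0 ≤ t2) (m : Nat) (hm : m ≤ l.length + 1)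
    (hprev : ∀ x y z, 0 ≤ x → 0 ≤ y → 0 ≤ z → z ≤ (l.length : Int) →
      ((x < t1 ∧ y ≤ max t1 t2) ∨ (x = t1 ∧ y < t2)) → pvGet3 v x y z = pvR l z.toNat x y) :
    (∀ x y z, ¬(x = t1 ∧ y = t2) → pvGet3 (pvAiLoop l (m : Int) v t1 t2) x y z = pvGet3 v x y z) ∧
    (∀ z : Nat, z < m → pvGet3 (pvAiLoop l (m : Int) v t1 t2) t1 t2 z = pvR l z t1 t2) := by
  induction m with
  | zero =>
    constructor
    · intro x y z _; simp [pvAiLoop]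
    · intro z hz; omega
  | succ m ih =>
    obtain ⟨ih1, ih2⟩ := ih (by omega)
    have hsplit : PySem.List.pyRange 0 ((m + 1 : Nat) : Int) 1 =
        PySem.List.pyRange 0 (m : Int) 1 ++ [(m : Int)] := by
      push_cast
      exact PySem.List.pyRange_one_succ_right (a := 0) (b := (m : Int)) (by omega)
    have hfold : pvAiLoop l ((m + 1 : Nat) : Int) v t1 t2 =
        pvUpd3 (pvAiLoop l (m : Int) v t1 t2) t1 t2 (m : Int)
          (pvCellA l (pvAiLoop l (m : Int) v t1 t2) t1 t2 (m : Int)) := by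
      unfold pvAiLoop
      rw [hsplit, List.foldl_append]
      rfl
    have hprev' : ∀ x y z, 0 ≤ x → 0 ≤ y → 0 ≤ z → z ≤ (l.length : Int) →
        ((x < t1 ∧ y ≤ max t1 t2) ∨ (x = t1 ∧ y < t2)) →
        pvGet3 (pvAiLoop l (m : Int) v t1 t2) x y z = pvR l z.toNat x y := by
      intro x y z hx hy hz hzl hcond
      rw [ih1 x y z (by rcases hcond with ⟨h1, _⟩ | ⟨h1, h2⟩ <;> intro hc <;> omega)]
      exact hprev x y z hx hy hz hzl hcond
    have hcell : pvCellA l (pvAiLoop l (m : Int) v t1 t2) t1 t2 (m : Int) = pvR l m t1 t2 :=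
      pvCellA_eq_pvR l h _ t1 t2 ht1 ht2 m (by omega) hprev' ih2
    constructor
    · intro x y z hxy
      rw [hfold, pvGet3_upd]
      rw [if_neg (by intro hc; exact hxy ⟨hc.1, hc.2.1⟩)]
      exact ih1 x y z hxy
    · intro z hz
      rw [hfold, pvGet3_upd]
      by_cases hzm : (z : Int) = (m : Int)
      · have : z = m := by exact_mod_cast hzm
        subst this
        rw [if_pos ⟨rfl, rfl, rfl⟩, hcell]
      · rw [if_neg (by intro hc; exact hzm hc.2.2)]
        exact ih2 z (by omega)

lemma pvT2Loop_spec (l : List Int) (h : ∀ a ∈ l, 0 ≤ a) (T : Int) (_hT : 0 ≤ T)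
    (v : List ((Int × Int × Int) × Int)) (t1 : Int) (ht1 : 0 ≤ t1) (_ht1T : t1 ≤ T) (m : Nat)
    (hm : (m : Int) ≤ T + 1)
    (hprev : ∀ x y z, 0 ≤ x → 0 ≤ y → y ≤ T → 0 ≤ z → z ≤ (l.length : Int) →
      x < t1 → pvGet3 v x y z = pvR l z.toNat x y) :
    (∀ x y z, ¬(x = t1 ∧ 0 ≤ y ∧ y < (m : Int)) → pvGet3 (pvT2Loop l (l.length : Int) (m : Int) v t1) x y z = pvGet3 v x y z) ∧
    (∀ y z : Int, 0 ≤ y → y < (m : Int) → 0 ≤ z → z ≤ (l.length : Int) →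
      pvGet3 (pvT2Loop l (l.length : Int) (m : Int) v t1) t1 y z = pvR l z.toNat t1 y) := by
  induction m with
  | zero =>
    constructor
    · intro x y z _; simp [pvT2Loop]
    · intro y z hy hym _ _; omega
  | succ m ih =>
    obtain ⟨ih1, ih2⟩ := ih (by omega)
    have hsplit : PySem.List.pyRange 0 ((m + 1 : Nat) : Int) 1 =
        PySem.List.pyRange 0 (m : Int) 1 ++ [(m : Int)] := by
      push_cast
      exact PySem.List.pyRange_one_succ_right (a := 0) (b := (m : Int)) (by omega)
    have hfold : pvT2Loop l (l.length : Int) ((m + 1 : Nat) : Int) v t1 =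
        pvAiLoop l ((l.length : Int) + 1) (pvT2Loop l (l.length : Int) (m : Int) v t1) t1 (m : Int) := by
      unfold pvT2Loop
      rw [hsplit, List.foldl_append]
      rfl
    have hprevAi : ∀ x y z, 0 ≤ x → 0 ≤ y → 0 ≤ z → z ≤ (l.length : Int) →
        ((x < t1 ∧ y ≤ max t1 (m : Int)) ∨ (x = t1 ∧ y < (m : Int))) →
        pvGet3 (pvT2Loop l (l.length : Int) (m : Int) v t1) x y z = pvR l z.toNat x y := by
      intro x y z hx hy hz hzl hcond
      rcases hcond with ⟨hlt, _⟩ | ⟨rfl, hylt⟩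
      · rw [ih1 x y z (by intro hc; omega)]
        exact hprev x y z hx hy (by omega) hz hzl hlt
      · exact ih2 y z hy hylt hz hzl
    have hAi := pvAiLoop_spec l h (pvT2Loop l (l.length : Int) (m : Int) v t1) t1 (m : Int)
      ht1 (by omega) (l.length + 1) (by omega) hprevAi
    obtain ⟨hAi1, hAi2⟩ := hAi
    have hAicast : ((l.length + 1 : Nat) : Int) = (l.length : Int) + 1 := by push_cast; ring
    constructor
    · intro x y z hxy
      rw [hfold, ← hAicast, hAi1 x y z (by intro hc; exact hxy ⟨hc.1, by omega, by omega⟩)]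
      exact ih1 x y z (by intro hc; exact hxy ⟨hc.1, hc.2.1, by omega⟩)
    · intro y z hy hym hz hzl
      rw [hfold, ← hAicast]
      by_cases hymeq : y = (m : Int)
      · subst hymeq
        have hznat : z = ((z.toNat : Nat) : Int) := by omega
        rw [hznat]
        exact hAi2 z.toNat (by omega)
      · rw [hAi1 t1 y z (by intro hc; exact hymeq hc.2)]
        exact ih2 y z hy (by omega) hz hzl

lemma pvT1Loop_spec (l : List Int) (h : ∀ a ∈ l, 0 ≤ a) (T : Int) (hT : 0 ≤ T)
    (m : Nat) (hm : (m : Int) ≤ T + 1) :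
    ∀ x y z : Int, 0 ≤ x → x < (m : Int) → 0 ≤ y → y ≤ T → 0 ≤ z → z ≤ (l.length : Int) →
      pvGet3 (pvT1Loop l (l.length : Int) T (m : Int) []) x y z = pvR l z.toNat x y := by
  induction m with
  | zero => intro x y z _ hx _ _ _ _; omega
  | succ m ih =>
    have hsplit : PySem.List.pyRange 0 ((m + 1 : Nat) : Int) 1 =
        PySem.List.pyRange 0 (m : Int) 1 ++ [(m : Int)] := by
      push_cast
      exact PySem.List.pyRange_one_succ_right (a := 0) (b := (m : Int)) (by omega)
    have hfold : pvT1Loop l (l.length : Int) T ((m + 1 : Nat) : Int) [] =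
        pvT2Loop l (l.length : Int) (T + 1)
          (pvT1Loop l (l.length : Int) T (m : Int) []) (m : Int) := by
      unfold pvT1Loop
      rw [hsplit, List.foldl_append]
      rfl
    have ihm := ih (by omega)
    have hprev : ∀ x y z, 0 ≤ x → 0 ≤ y → y ≤ T → 0 ≤ z → z ≤ (l.length : Int) →
        x < (m : Int) →
        pvGet3 (pvT1Loop l (l.length : Int) T (m : Int) []) x y z = pvR l z.toNat x y := by
      intro x y z hx hy hyT hz hzl hlt
      exact ihm x y z hx hlt hy hyT hz hzl
    have hT2 := pvT2Loop_spec l h T hT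
      (pvT1Loop l (l.length : Int) T (m : Int) []) (m : Int)
      (by omega) (by omega) (T + 1).toNat (by omega) hprev
    obtain ⟨hT2a, hT2b⟩ := hT2
    have hTcast : (((T + 1).toNat : Nat) : Int) = T + 1 := by omega
    intro x y z hx hxm hy hyT hz hzl
    rw [hfold]
    by_cases hxeq : x = (m : Int)
    · subst hxeq
      have := hT2b y z hy (by omega) hz hzl
      rw [hTcast] at this
      exact this
    · have := hT2a x y z (by intro hc; exact hxeq hc.1)
      rw [hTcast] at this
      rw [this]
      exact ihm x y z hx (by omega) hy hyT hz hzl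

-- A's result on the non-early-return path equals pvR at (T, T, len)
lemma partition3d_eq_pvR (l : List Int) (h : ∀ a ∈ l, 0 ≤ a)
    (hm : PySem.Int.mod l.sum 3 = 0) :
    partition3d l = pvR l l.length (PySem.Int.floordiv l.sum 3) (PySem.Int.floordiv l.sum 3) := by
  have hs : 0 ≤ l.sum := List.sum_nonneg h
  have hT : 0 ≤ PySem.Int.floordiv l.sum 3 := by
    rw [PySem.Int.floordiv_eq_ediv_of_pos (by omega)]
    exact Int.ediv_nonneg hs (by omega)
  set T := PySem.Int.floordiv l.sum 3 with hTdef
  have hloop : (PySem.List.pyRange 0 (T + 1) 1).foldl (fun v t1 =>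
      (PySem.List.pyRange 0 (T + 1) 1).foldl (fun v t2 =>
        (PySem.List.pyRange 0 ((l.length : Int) + 1) 1).foldl (fun v ai =>
          pvUpd3 v t1 t2 ai (pvCellA l v t1 t2 ai)) v) v) ([] : List ((Int × Int × Int) × Int)) =
      pvT1Loop l (l.length : Int) T (T + 1) [] := by
    rfl
  have hfin := pvT1Loop_spec l h T hT (T + 1).toNat (by omega) T T (l.length : Int)
    hT (by omega) hT (le_refl T) (by omega) (le_refl _)
  have hTcast : (((T + 1).toNat : Nat) : Int) = T + 1 := by omega
  rw [hTcast] at hfin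
  have hlen : ((l.length : Int)).toNat = l.length := by omega
  rw [hlen] at hfin
  simp only [partition3d]
  rw [if_neg (not_not_intro hm), ← hTdef, hloop]
  exact hfin

-- the degenerate path: zero total (T = 0), possibly with negative items — A fills only the (0,0,·) line
lemma pvAiLoop_zero_line (l : List Int) (v : List ((Int × Int × Int) × Int)) (m : Nat) (z : Nat)
    (hz : z < m) : pvGet3 (pvAiLoop l (m : Int) v 0 0) 0 0 (z : Int) = 1 := by
  induction m with
  | zero => omega
  | succ m ih =>
    have hsplit : PySem.List.pyRange 0 ((m + 1 : Nat) : Int) 1 =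
        PySem.List.pyRange 0 (m : Int) 1 ++ [(m : Int)] := by
      push_cast
      exact PySem.List.pyRange_one_succ_right (a := 0) (b := (m : Int)) (by omega)
    have hfold : pvAiLoop l ((m + 1 : Nat) : Int) v 0 0 =
        pvUpd3 (pvAiLoop l (m : Int) v 0 0) 0 0 (m : Int)
          (pvCellA l (pvAiLoop l (m : Int) v 0 0) 0 0 (m : Int)) := by
      unfold pvAiLoop
      rw [hsplit, List.foldl_append]
      rfl
    rw [hfold, pvGet3_upd]
    by_cases hzm : (z : Int) = (m : Int)
    · rw [if_pos ⟨rfl, rfl, hzm⟩]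
      simp [pvCellA]
    · rw [if_neg (by intro hc; exact hzm hc.2.2)]
      exact ih (by omega)

lemma partition3d_zero_sum (l : List Int) (hs : l.sum = 0) : partition3d l = 1 := by
  have hm : PySem.Int.mod l.sum 3 = 0 := by rw [hs]; decide
  have hT : PySem.Int.floordiv l.sum 3 = 0 := by rw [hs]; decide
  simp only [partition3d]
  rw [if_neg (not_not_intro hm), hT]
  have h01 : PySem.List.pyRange 0 (0 + 1) 1 = [(0 : Int)] :=
    PySem.List.pyRange_one_singleton 0
  rw [h01]
  simp only [List.foldl_cons, List.foldl_nil]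
  have : ((l.length : Nat) : Int) = (l.length : Int) := rfl
  have := pvAiLoop_zero_line l [] (l.length + 1) l.length (by omega)
  have hcast : ((l.length + 1 : Nat) : Int) = (l.length : Int) + 1 := by push_cast; ring
  rw [hcast] at this
  exact this

lemma partition3d_alt_zero_sum (l : List Int) (hs : l.sum = 0) : partition3d_alt l = 1 := by
  have hm : PySem.Int.mod l.sum 3 = 0 := by rw [hs]; decide
  have hT : PySem.Int.floordiv l.sum 3 = 0 := by rw [hs]; decide
  simp only [partition3d_alt]
  rw [if_neg (not_not_intro hm), hT, pvS_full]
  rw [if_pos (pvS_zero_zero_mem l 0 l.length)]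

-- ===== VERDICT (by name: the statement is the Claim_ definition above) =====
theorem partition3d_spec : Claim_equal_partition3d := by
  unfold Claim_equal_partition3d
  intro l _ hpre
  unfold Spec_partition3d
  by_cases hm : PySem.Int.mod l.sum 3 = 0
  · rcases hpre with hpre | hpre | hpre
    · exact absurd hm hpre
    · rw [partition3d_zero_sum l hpre, partition3d_alt_zero_sum l hpre]
    · -- main path: all items nonnegative
      have hs : 0 ≤ l.sum := List.sum_nonneg hpre
      have hT : 0 ≤ PySem.Int.floordiv l.sum 3 := by
        rw [PySem.Int.floordiv_eq_ediv_of_pos (by omega)]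
        exact Int.ediv_nonneg hs (by omega)
      set T := PySem.Int.floordiv l.sum 3 with hTdef
      rw [partition3d_eq_pvR l hpre hm]
      simp only [partition3d_alt]
      rw [if_neg (not_not_intro hm), ← hTdef, pvS_full]
      have hiff := pvS_iff_pvR l T hT hpre l.length (le_refl _) T T hT (le_refl T) hT (le_refl T)
      by_cases hmem : (T, T) ∈ pvS l T l.length
      · rw [if_pos hmem]
        exact hiff.mp hmem
      · rw [if_neg hmem]
        rcases pvR_01 l l.length T T with h0 | h1
        · exact h0
        · exact absurd (hiff.mpr h1) hmem
  · simp only [partition3d, partition3d_alt]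
    rw [if_pos hm, if_pos hm]
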